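-- pv_equiv track=rewrite | github.com/HEchooo/product-predict | preserve_style_translate.py | merge_bands_to_k
-- ===== SOURCE A (Python) =====
-- from typing import Any, Dict, List, Optional, Tuple
--
-- def merge_bands_to_k(bands: List[Tuple[int,int]], k: int) -> List[Tuple[int,int]]:
--     if k <= 0:
--         return []
--     b = [list(x) for x in bands]
--     while len(b) > k:
--         gaps = []
--         for i in range(len(b)-1):
--             gap = b[i+1][0] - b[i][1]
--             gaps.append((gap, i))
--         gaps.sort(key=lambda x: x[0])
--         _, i = gaps[0]
--         b[i][1] = b[i+1][1]
--         del b[i+1]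
--     return [(int(x[0]), int(x[1])) for x in b]
-- ===== SOURCE B (Python) =====
-- def merge_bands_to_k(bands, k):
--     if k <= 0:
--         return []
--     n = len(bands)
--     # gap values never change under merging, so pick the n-k smallest gaps once
--     # (stable sort = leftmost wins on ties, exactly A's greedy order)
--     order = sorted(range(n - 1), key=lambda i: bands[i + 1][0] - bands[i][1])
--     cut = set(order[:n - k]) if n > k else set()
--     out = []
--     start = None
--     for i, (s, e) in enumerate(bands):
--         if start is None:
--             start = s
--         if i not in cut:          # boundary i survives: close the current run
--             out.append((start, e))
--             start = None
--     return out
-- ===== Notes on version B (the rewrite author's own statement) =====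
-- stated objective: faster
-- what changed: A re-builds and re-sorts the whole gap list after every merge; B exploits that gap values are invariant under merging, sorts the boundary gaps once (stable, so ties break leftmost exactly as A's greedy loop), takes the n-k smallest as the cut set, and emits the merged runs in a single pass.
import Mathlib
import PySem

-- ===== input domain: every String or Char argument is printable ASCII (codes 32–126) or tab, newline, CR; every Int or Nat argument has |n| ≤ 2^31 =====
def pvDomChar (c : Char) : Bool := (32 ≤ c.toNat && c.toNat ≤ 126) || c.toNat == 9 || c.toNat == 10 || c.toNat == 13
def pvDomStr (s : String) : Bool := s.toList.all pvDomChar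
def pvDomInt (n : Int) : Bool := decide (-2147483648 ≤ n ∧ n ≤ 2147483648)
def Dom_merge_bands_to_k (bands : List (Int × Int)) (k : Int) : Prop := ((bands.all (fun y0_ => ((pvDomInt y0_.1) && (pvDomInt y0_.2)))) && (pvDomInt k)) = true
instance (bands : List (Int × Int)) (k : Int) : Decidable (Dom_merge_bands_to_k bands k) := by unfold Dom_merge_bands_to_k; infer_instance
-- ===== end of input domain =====

-- B replaces A's quadratic loop (re-building and re-sorting the gap list after every merge) by a single
-- stable sort of the boundary gaps: gap values never change when adjacent bands merge, so the merged
-- boundaries are exactly the n-k smallest gaps (leftmost on ties), and one pass builds the runs.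

-- ===== PORT A =====
-- termination helper for the while-loop, cited by decreasing_by
theorem pvAGapHead_bound (b : List (Int × Int)) (g i : Int) (rest : List (Int × Int))
    (hs : PySem.List.sorted
        ((PySem.List.pyRange 0 ((b.length : Int) - 1) 1).map
          (fun i => ((PySem.List.pyGetD b (i + 1) (0, 0)).1 - (PySem.List.pyGetD b i (0, 0)).2, i)))
        (fun p => p.1) false = (g, i) :: rest) :
    0 ≤ i ∧ i < (b.length : Int) - 1 := by
  have hmem : (g, i) ∈ PySem.List.sorted
      ((PySem.List.pyRange 0 ((b.length : Int) - 1) 1).map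
        (fun i => ((PySem.List.pyGetD b (i + 1) (0, 0)).1 - (PySem.List.pyGetD b i (0, 0)).2, i)))
      (fun p => p.1) false := by rw [hs]; exact List.mem_cons_self
  rw [PySem.List.mem_sorted] at hmem
  rcases List.mem_map.mp hmem with ⟨j, hj, hje⟩
  rcases (PySem.List.mem_pyRange_one).mp hj with ⟨h0, h1⟩
  cases hje
  exact ⟨h0, h1⟩

-- while len(b) > k: rebuild the gap list, sort it by gap, merge at its first index, repeat
def pvALoop (k : Nat) (b : List (Int × Int)) : List (Int × Int) :=
  if _h : k < b.length then
    match hs : PySem.List.sorted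
        ((PySem.List.pyRange 0 ((b.length : Int) - 1) 1).map
          (fun i => ((PySem.List.pyGetD b (i + 1) (0, 0)).1 - (PySem.List.pyGetD b i (0, 0)).2, i)))
        (fun p => p.1) false with
    | [] => b   -- unreachable when the loop is entered with 1 ≤ k (Python guarantees it)
    | (_, i) :: _ =>
      -- b[i][1] = b[i+1][1]; del b[i+1]   (i comes from range(len(b)-1), so 0 ≤ i: toNat is exact)
      pvALoop k ((b.set i.toNat ((PySem.List.pyGetD b i (0, 0)).1, (PySem.List.pyGetD b (i + 1) (0, 0)).2)).eraseIdx (i.toNat + 1))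
  else b
termination_by b.length
decreasing_by
  have hb := pvAGapHead_bound b _ i _ hs
  have h1 : i.toNat + 1 < b.length := by omega
  simp only [List.length_set, List.length_eraseIdx, h1, if_true]
  omega

def merge_bands_to_k (bands : List (Int × Int)) (k : Int) : List (Int × Int) :=
  if k ≤ 0 then []
  else (pvALoop k.toNat (bands.map (fun x => x))).map (fun x => ((x.1 : Int), (x.2 : Int)))

-- ===== PORT B =====
def merge_bands_to_k_alt (bands : List (Int × Int)) (k : Int) : List (Int × Int) :=
  if k ≤ 0 then []
  else
    let n : Int := bands.length
    -- order = sorted(range(n-1), key = gap at boundary i); stable sort, leftmost ties first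
    let order := PySem.List.sorted (PySem.List.pyRange 0 (n - 1) 1)
        (fun i => (PySem.List.pyGetD bands (i + 1) (0, 0)).1 - (PySem.List.pyGetD bands i (0, 0)).2) false
    -- cut = set(order[:n-k]) if n > k else set()   (n-k ≥ 0 in the taken branch, so take is the slice)
    let cut : PySem.Set Int := if k < n then PySem.Set.ofList (order.take (n - k).toNat) else PySem.Set.ofList []
    ((PySem.List.enumerate bands 0).foldl
      (fun (st : List (Int × Int) × Option Int) p =>
        let start := st.2.getD p.2.1
        if p.1 ∈ cut then (st.1, some start) else (st.1 ++ [(start, p.2.2)], none))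
      ([], none)).1

-- ===== PRECONDITION & SPEC =====
def Spec_merge_bands_to_k (bands : List (Int × Int)) (k : Int) (out : List (Int × Int)) : Prop := out = merge_bands_to_k_alt bands k
instance (bands : List (Int × Int)) (k : Int) (out : List (Int × Int)) : Decidable (Spec_merge_bands_to_k bands k out) := by unfold Spec_merge_bands_to_k; infer_instance

-- ===== CLAIM (what is proved, stated in full; the proofs are below) =====
def Claim_equal_merge_bands_to_k : Prop := ∀ (bands : List (Int × Int)) (k : Int), Dom_merge_bands_to_k bands k → Spec_merge_bands_to_k bands k (merge_bands_to_k bands k)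

-- ===== LEMMAS AND PROOFS =====

-- the gap value at boundary i (both ports compute this expression)
def pvG (b : List (Int × Int)) (i : Int) : Int :=
  (PySem.List.pyGetD b (i + 1) (0, 0)).1 - (PySem.List.pyGetD b i (0, 0)).2

def pvGaps (b : List (Int × Int)) : List (Int × Int) :=
  (PySem.List.pyRange 0 ((b.length : Int) - 1) 1).map (fun i => (pvG b i, i))

def pvOrder (b : List (Int × Int)) : List Int :=
  PySem.List.sorted (PySem.List.pyRange 0 ((b.length : Int) - 1) 1) (fun i => pvG b i) false

-- boundary reindexing after a merge at i0
def pvPhi (i0 j : Int) : Int := if j < i0 then j else j + 1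

-- B's run-building loop as a structural recursion
def pvRuns (P : Int → Bool) : Option Int → Int → List (Int × Int) → List (Int × Int)
  | _, _, [] => []
  | st, i, x :: t =>
    if P i then pvRuns P (some (st.getD x.1)) (i + 1) t
    else (st.getD x.1, x.2) :: pvRuns P none (i + 1) t

def pvCut (b : List (Int × Int)) (K : Nat) : List Int :=
  if K < b.length then (pvOrder b).take (b.length - K) else []

def pvBC (b : List (Int × Int)) (K : Nat) : List (Int × Int) :=
  pvRuns (fun j => decide (j ∈ pvCut b K)) none 0 b

-- strict "sort by key, ties by original position" order
def pvLexLt {a : Type} (key idx : a → Int) (x y : a) : Prop :=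
  key x < key y ∨ (key x = key y ∧ idx x < idx y)

theorem pvRuns_congr (P Q : Int → Bool) :
    ∀ (y : List (Int × Int)) (st : Option Int) (i i' : Int),
    (∀ t : Nat, t < y.length → P (i + t) = Q (i' + t)) →
    pvRuns P st i y = pvRuns Q st i' y := by
  intro y
  induction y with
  | nil => intro st i i' _; rfl
  | cons x t ih =>
    intro st i i' h
    have h0 : P i = Q i' := by simpa using h 0 (by simp)
    have ht : ∀ s : Nat, s < t.length → P ((i+1) + s) = Q ((i'+1) + s) := by
      intro s hs
      have := h (s+1) (by simp; omega)
      have e1 : i + ((s : Int) + 1) = (i + 1) + s := by ring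
      have e2 : i' + ((s : Int) + 1) = (i' + 1) + s := by ring
      simpa [e1, e2] using this
    simp only [pvRuns, h0]
    by_cases hq : Q i' = true
    · simp [hq, ih _ _ _ ht]
    · simp at hq; simp [hq, ih _ _ _ ht]

theorem pvRuns_false (P : Int → Bool) :
    ∀ (y : List (Int × Int)) (i : Int),
    (∀ t : Nat, t < y.length → P (i + t) = false) →
    pvRuns P none i y = y := by
  intro y
  induction y with
  | nil => intro i _; rfl
  | cons x t ih =>
    intro i h
    have h0 : P i = false := by simpa using h 0 (by simp)
    have ht : ∀ s : Nat, s < t.length → P ((i+1) + s) = false := by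
      intro s hs
      have := h (s+1) (by simp; omega)
      have e1 : i + ((s : Int) + 1) = (i + 1) + s := by ring
      simpa [e1] using this
    simp [pvRuns, h0, ih _ ht]

theorem pvFold_eq_runs (cut : List Int) :
    ∀ (b : List (Int × Int)) (out : List (Int × Int)) (st : Option Int) (i : Int),
    (List.foldl (fun (st : List (Int × Int) × Option Int) p =>
        let start := st.2.getD p.2.1
        if p.1 ∈ cut then (st.1, some start) else (st.1 ++ [(start, p.2.2)], none))
      (out, st) (PySem.List.enumerate b i)).1
    = out ++ pvRuns (fun j => decide (j ∈ cut)) st i b := by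
  intro b
  induction b with
  | nil => intro out st i; simp [PySem.List.enumerate, pvRuns]
  | cons x t ih =>
    intro out st i
    rw [PySem.List.enumerate_cons]
    simp only [List.foldl_cons]
    by_cases hm : i ∈ cut
    · simp only [hm, if_pos, pvRuns, decide_eq_true_eq, ih]
    · simp only [pvRuns]
      rw [ih]
      simp [hm]

theorem pvSetErase (b : List (Int × Int)) (i0 : Nat) (v : Int × Int) (h : i0 + 1 < b.length) :
    (b.set i0 v).eraseIdx (i0 + 1) = b.take i0 ++ v :: b.drop (i0 + 2) := by
  rw [List.eraseIdx_eq_take_drop_succ, List.set_eq_take_append_cons_drop, if_pos (by omega)]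
  have hlt : (b.take i0).length = i0 := by simp; omega
  rw [List.take_append, List.drop_append, hlt]
  have h1 : List.take (i0 + 1) (b.take i0) = b.take i0 := by
    rw [List.take_take]; congr 1; omega
  have h2 : i0 + 1 - i0 = 1 := by omega
  have h3 : i0 + 1 + 1 - i0 = 2 := by omega
  have h4 : List.drop (i0 + 1 + 1) (b.take i0) = [] := by
    apply List.drop_eq_nil_of_le; simp; omega
  rw [h1, h2, h3, h4]
  simp [List.drop_drop]

theorem pvG_eq (b : List (Int × Int)) (j : Int) (h0 : 0 ≤ j) (h1 : j + 1 < (b.length : Int)) :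
    pvG b j = (b[j.toNat + 1]'(by omega)).1 - (b[j.toNat]'(by omega)).2 := by
  unfold pvG
  have eA : PySem.List.pyGetD b (j + 1) (0, 0) = b.getD (j.toNat + 1) (0, 0) := by
    rw [show j + 1 = ((j.toNat + 1 : Nat) : Int) from by omega, PySem.List.pyGetD_natCast]
  have eB : PySem.List.pyGetD b j (0, 0) = b.getD j.toNat (0, 0) := by
    rw [show j = ((j.toNat : Nat) : Int) from by omega, PySem.List.pyGetD_natCast]
    simp [max_eq_left h0]
  rw [eA, eB, List.getD_eq_getElem _ _ (by omega), List.getD_eq_getElem _ _ (by omega)]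

theorem pvMerged_getElem (b : List (Int × Int)) (i0 : Nat) (v : Int × Int) (h : i0 + 1 < b.length)
    (t : Nat) (ht : t < b.length - 1) :
    (b.take i0 ++ v :: b.drop (i0 + 2))[t]'(by simp; omega)
    = if t < i0 then b[t]'(by omega) else if h2 : t = i0 then v else b[t+1]'(by omega) := by
  by_cases h1 : t < i0
  · rw [List.getElem_append_left (by simp; omega)]
    simp [h1, List.getElem_take]
  · rw [List.getElem_append_right (by simp; omega)]
    have hmin : min i0 b.length = i0 := by omega
    by_cases h2 : t = i0
    · subst h2
      rw [List.getElem_cons, dif_pos (by simp; omega)]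
      simp
    · have hnz : t - (List.take i0 b).length = t - i0 := by simp [hmin]
      rw [List.getElem_cons]
      rw [dif_neg (by simp [hmin]; omega)]
      simp only [List.getElem_drop]
      rw [if_neg h1, dif_neg h2]
      congr 1
      simp [hmin]
      omega

theorem pvG_merged (b : List (Int × Int)) (i0 : Nat) (h : i0 + 1 < b.length)
    (j : Int) (hj0 : 0 ≤ j) (hj1 : j < (b.length : Int) - 2) :
    pvG (b.take i0 ++ ((b[i0]'(by omega)).1, (b[i0+1]'(by omega)).2) :: b.drop (i0 + 2)) j
    = pvG b (pvPhi (i0 : Int) j) := by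
  set v : Int × Int := ((b[i0]'(by omega)).1, (b[i0+1]'(by omega)).2) with hv
  have hlen : (b.take i0 ++ v :: b.drop (i0 + 2)).length = b.length - 1 := by simp; omega
  have hG1 : pvG (b.take i0 ++ v :: b.drop (i0 + 2)) j
      = ((b.take i0 ++ v :: b.drop (i0 + 2))[j.toNat + 1]'(by omega)).1
        - ((b.take i0 ++ v :: b.drop (i0 + 2))[j.toNat]'(by omega)).2 := by
    apply pvG_eq
    · omega
    · rw [hlen]; omega
  rw [hG1]
  rw [pvMerged_getElem b i0 v h (j.toNat + 1) (by omega),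
      pvMerged_getElem b i0 v h j.toNat (by omega)]
  unfold pvPhi
  by_cases hc : j < (i0 : Int)
  · rw [if_pos hc]
    rw [pvG_eq b j hj0 (by omega)]
    have c1 : j.toNat + 1 < i0 ∨ j.toNat + 1 = i0 := by omega
    rcases c1 with c1 | c1
    · simp [c1, show j.toNat < i0 by omega]
    · rw [if_neg (by omega), dif_pos c1, if_pos (by omega)]
      rw [hv]
      simp [c1]
  · rw [if_neg hc]
    rw [pvG_eq b (j + 1) (by omega) (by omega)]
    have e1 : ¬ (j.toNat + 1 < i0) := by omega
    have e2 : ¬ (j.toNat < i0) := by omega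
    have e3 : ¬ (j.toNat + 1 = i0) := by omega
    have eidx : (j + 1).toNat = j.toNat + 1 := by omega
    rw [if_neg e1, dif_neg e3, if_neg e2]
    by_cases e4 : j.toNat = i0
    · rw [dif_pos e4, hv]
      simp only [eidx, ← e4]
    · rw [dif_neg e4]
      simp only [eidx]

theorem pvInsert_pairwise {a : Type} (key idx : a → Int) (x : a) (acc : List a)
    (hp : acc.Pairwise (pvLexLt key idx)) (hidx : ∀ y ∈ acc, idx y < idx x) :
    (PySem.List.insertBy (fun p q => decide (key p < key q)) x acc).Pairwise (pvLexLt key idx) := by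
  induction acc with
  | nil => simp [PySem.List.insertBy]
  | cons y ys ih =>
    rw [List.pairwise_cons] at hp
    obtain ⟨hy, hys⟩ := hp
    by_cases hb : key x < key y
    · have : PySem.List.insertBy (fun p q => decide (key p < key q)) x (y :: ys)
          = x :: y :: ys := by simp [PySem.List.insertBy, hb]
      rw [this, List.pairwise_cons]
      refine ⟨?_, by rw [List.pairwise_cons]; exact ⟨hy, hys⟩⟩
      intro z hz
      rcases List.mem_cons.mp hz with rfl | hz
      · exact Or.inl hb
      · have := hy z hz
        rcases this with h1 | h2
        · exact Or.inl (lt_trans hb h1)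
        · exact Or.inl (by omega)
    · have : PySem.List.insertBy (fun p q => decide (key p < key q)) x (y :: ys)
          = y :: PySem.List.insertBy (fun p q => decide (key p < key q)) x ys := by
        simp [PySem.List.insertBy, hb]
      rw [this, List.pairwise_cons]
      constructor
      · intro z hz
        rw [PySem.List.mem_insertBy] at hz
        rcases hz with rfl | hz
        · rcases lt_or_eq_of_le (not_lt.mp hb) with h1 | h2
          · exact Or.inl h1
          · exact Or.inr ⟨h2, hidx y (by simp)⟩
        · exact hy z hz
      · exact ih hys (fun z hz => hidx z (by simp [hz]))

theorem pvFoldInsert_pairwise {a : Type} (key idx : a → Int) :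
    ∀ (xs acc : List a),
    acc.Pairwise (pvLexLt key idx) → (∀ y ∈ acc, ∀ z ∈ xs, idx y < idx z) →
    xs.Pairwise (fun y z => idx y < idx z) →
    (xs.foldl (fun acc x => PySem.List.insertBy (fun p q => decide (key p < key q)) x acc) acc).Pairwise
      (pvLexLt key idx) := by
  intro xs
  induction xs with
  | nil => intro acc h _ _; simpa using h
  | cons x t ih =>
    intro acc hacc hmix hxs
    rw [List.pairwise_cons] at hxs
    simp only [List.foldl_cons]
    apply ih
    · exact pvInsert_pairwise key idx x acc hacc (fun y hy => hmix y hy x (by simp))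
    · intro y hy z hz
      rw [PySem.List.mem_insertBy] at hy
      rcases hy with rfl | hy
      · exact hxs.1 z hz
      · exact hmix y hy z (by simp [hz])
    · exact hxs.2

theorem pvSorted_pairwise_lex {a : Type} (key idx : a → Int) (xs : List a)
    (h : xs.Pairwise fun y z => idx y < idx z) :
    (PySem.List.sorted xs key false).Pairwise (pvLexLt key idx) := by
  rw [PySem.List.sorted_eq_foldl_insertBy]
  exact pvFoldInsert_pairwise key idx xs [] (by simp) (by simp) h

theorem pvLex_unique {a : Type} (key idx : a → Int)
    (hinj : Function.Injective (fun x => ((key x, idx x) : Int × Int)))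
    (l1 l2 : List a) (hperm : l1.Perm l2)
    (h1 : l1.Pairwise (pvLexLt key idx)) (h2 : l2.Pairwise (pvLexLt key idx)) : l1 = l2 := by
  apply PySem.List.eq_of_perm_of_pairwise_le_of_injective
    (key := fun x => (toLex ((key x, idx x) : Int × Int) : Int ×ₗ Int))
  · intro u v huv
    simp only at huv
    exact hinj (by simpa using congrArg ofLex huv)
  · exact hperm
  · exact h1.imp (fun {u v} huv => by
      rw [Prod.Lex.toLex_le_toLex]
      rcases huv with h | ⟨he, hi⟩
      · exact Or.inl h
      · exact Or.inr ⟨he, le_of_lt hi⟩)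
  · exact h2.imp (fun {u v} huv => by
      rw [Prod.Lex.toLex_le_toLex]
      rcases huv with h | ⟨he, hi⟩
      · exact Or.inl h
      · exact Or.inr ⟨he, le_of_lt hi⟩)

theorem pvRange_map_add_one (lo hi : Int) :
    (PySem.List.pyRange lo hi 1).map (fun j => j + 1) = PySem.List.pyRange (lo + 1) (hi + 1) 1 := by
  rw [PySem.List.pyRange_one, PySem.List.pyRange_one]
  have : hi + 1 - (lo + 1) = hi - lo := by ring
  rw [this, List.map_map]
  apply List.map_congr_left
  intro k _
  simp; ring

theorem pvRuns_merge (p q : Int × Int) :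
    ∀ (x : List (Int × Int)) (y : List (Int × Int)) (P : Int → Bool) (st : Option Int) (i m : Int),
    m = i + x.length → P m = true →
    pvRuns P st i (x ++ p :: q :: y)
    = pvRuns (fun j => if j < m then P j else P (j + 1)) st i (x ++ (p.1, q.2) :: y) := by
  intro x
  induction x with
  | nil =>
    intro y P st i m hm hP
    simp only [List.length_nil, Nat.cast_zero, add_zero] at hm
    subst hm
    simp only [List.nil_append]
    simp only [pvRuns, hP, if_true]
    rw [if_neg (lt_irrefl m)]
    simp only [Option.getD_some]
    by_cases hq : P (m + 1) = true
    · simp only [hq, if_true]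
      exact pvRuns_congr _ _ y _ (m + 1 + 1) (m + 1)
        (fun t ht => by rw [if_neg (by omega)]; congr 1; ring)
    · simp only [Bool.not_eq_true] at hq
      simp only [hq, Bool.false_eq_true, if_false]
      congr 1
      exact pvRuns_congr _ _ y _ (m + 1 + 1) (m + 1)
        (fun t ht => by rw [if_neg (by omega)]; congr 1; ring)
  | cons a x ih =>
    intro y P st i m hm hP
    simp only [List.cons_append]
    rw [pvRuns, pvRuns]
    have him : i < m := by
      simp only [List.length_cons] at hm
      omega
    rw [if_pos him]
    have hm' : m = (i + 1) + x.length := by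
      simp only [List.length_cons] at hm
      push_cast at hm ⊢
      omega
    by_cases hPi : P i = true
    · rw [hPi]; simp only [if_true]
      exact ih y P _ (i + 1) m hm' hP
    · rw [Bool.not_eq_true] at hPi
      rw [hPi]
      simp only [Bool.false_eq_true, if_false]
      congr 1
      exact ih y P _ (i + 1) m hm' hP

-- head of A's sorted gap list: the leftmost minimal gap, with its value
theorem pvHead_props (b : List (Int × Int)) (gm i0 : Int) (rest : List (Int × Int))
    (hs : PySem.List.sorted (pvGaps b) (fun p => p.1) false = (gm, i0) :: rest) :
    gm = pvG b i0 ∧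
    (∀ j : Int, 0 ≤ j → j < (b.length : Int) - 1 → j ≠ i0 →
      pvG b i0 < pvG b j ∨ (pvG b i0 = pvG b j ∧ i0 < j)) := by
  have hpair : (pvGaps b).Pairwise (fun y z => (fun p : Int × Int => p.2) y < (fun p : Int × Int => p.2) z) := by
    unfold pvGaps
    apply List.Pairwise.map
    · intro u v huv
      exact huv
    · exact PySem.List.pairwise_lt_pyRange_one 0 ((b.length : Int) - 1)
  have hsp := pvSorted_pairwise_lex (fun p : Int × Int => p.1) (fun p : Int × Int => p.2) (pvGaps b) hpair
  rw [hs, List.pairwise_cons] at hsp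
  have hmemhead : ((gm, i0) : Int × Int) ∈ pvGaps b := by
    rw [← PySem.List.mem_sorted (pvGaps b) (fun p : Int × Int => p.1) false, hs]
    exact List.mem_cons_self
  have hgm : gm = pvG b i0 := by
    unfold pvGaps at hmemhead
    rcases List.mem_map.mp hmemhead with ⟨j, _, hje⟩
    have h1 : pvG b j = gm := congrArg Prod.fst hje
    have h2 : j = i0 := congrArg Prod.snd hje
    rw [← h1, h2]
  refine ⟨hgm, ?_⟩
  intro j hj0 hj1 hjne
  have hjmem : ((pvG b j, j) : Int × Int) ∈ pvGaps b := by
    unfold pvGaps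
    exact List.mem_map.mpr ⟨j, PySem.List.mem_pyRange_one.mpr ⟨hj0, by omega⟩, rfl⟩
  rw [← PySem.List.mem_sorted (pvGaps b) (fun p : Int × Int => p.1) false, hs] at hjmem
  rcases List.mem_cons.mp hjmem with heq | hmem
  · exact absurd (congrArg Prod.snd heq) hjne
  · have := hsp.1 _ hmem
    unfold pvLexLt at this
    simp only at this
    rw [← hgm]
    exact this

-- the sorted boundary order of the merged list is the tail of the original one, reindexed
theorem pvOrder_step (b : List (Int × Int)) (gm i0 : Int) (rest : List (Int × Int))
    (hs : PySem.List.sorted (pvGaps b) (fun p => p.1) false = (gm, i0) :: rest)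
    (hi0 : 0 ≤ i0) (hi1 : i0 < (b.length : Int) - 1) :
    pvOrder b = i0 :: (pvOrder (b.take i0.toNat ++
        ((b[i0.toNat]'(by omega)).1, (b[i0.toNat+1]'(by omega)).2) :: b.drop (i0.toNat + 2))).map
      (pvPhi i0) := by
  have hfm := (pvHead_props b gm i0 rest hs).2
  have hn2 : 2 ≤ b.length := by omega
  set bM := b.take i0.toNat ++
      ((b[i0.toNat]'(by omega)).1, (b[i0.toNat+1]'(by omega)).2) :: b.drop (i0.toNat + 2) with hbM
  have hlenM : bM.length = b.length - 1 := by
    rw [hbM]; simp; omega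
  have hlenMI : (bM.length : Int) = (b.length : Int) - 1 := by rw [hlenM]; omega
  have hGM : ∀ j : Int, 0 ≤ j → j < (b.length : Int) - 2 → pvG bM j = pvG b (pvPhi i0 j) := by
    intro j h0 h1
    have := pvG_merged b i0.toNat (by omega) j h0 h1
    rw [← hbM] at this
    rw [this]
    congr 1
    unfold pvPhi
    rw [show ((i0.toNat : Int)) = i0 from by omega]
  have hmemM : ∀ j : Int, j ∈ pvOrder bM → 0 ≤ j ∧ j < (b.length : Int) - 2 := by
    intro j hj
    unfold pvOrder at hj
    rw [PySem.List.mem_sorted] at hj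
    have := PySem.List.mem_pyRange_one.mp hj
    omega
  -- the candidate right-hand side
  apply pvLex_unique (pvG b) (fun j => j)
    (by intro u v huv; exact congrArg Prod.snd huv)
  -- permutation
  · have p1 : (pvOrder b).Perm (PySem.List.pyRange 0 ((b.length : Int) - 1) 1) :=
      PySem.List.sorted_perm _ _ _
    have e : PySem.List.pyRange 0 ((bM.length : Int) - 1) 1
        = PySem.List.pyRange 0 ((b.length : Int) - 2) 1 := by
      rw [show (bM.length : Int) - 1 = (b.length : Int) - 2 from by omega]
    have p2 : (pvOrder bM).Perm (PySem.List.pyRange 0 ((b.length : Int) - 2) 1) := by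
      unfold pvOrder
      rw [← e]
      exact PySem.List.sorted_perm _ _ _
    have emap : (PySem.List.pyRange 0 ((b.length : Int) - 2) 1).map (pvPhi i0)
        = PySem.List.pyRange 0 i0 1 ++ PySem.List.pyRange (i0 + 1) ((b.length : Int) - 1) 1 := by
      rw [PySem.List.pyRange_one_append 0 i0 ((b.length : Int) - 2) hi0 (by omega),
        List.map_append]
      congr 1
      · have h1 : List.map (pvPhi i0) (PySem.List.pyRange 0 i0 1)
            = List.map id (PySem.List.pyRange 0 i0 1) := by
          apply List.map_congr_left
          intro j hj
          have := PySem.List.mem_pyRange_one.mp hj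
          unfold pvPhi
          rw [if_pos (by omega)]
          rfl
        rw [h1, List.map_id]
      · have h1 : List.map (pvPhi i0) (PySem.List.pyRange i0 ((b.length : Int) - 2) 1)
            = List.map (fun j => j + 1) (PySem.List.pyRange i0 ((b.length : Int) - 2) 1) := by
          apply List.map_congr_left
          intro j hj
          have := PySem.List.mem_pyRange_one.mp hj
          unfold pvPhi
          rw [if_neg (by omega)]
        rw [h1, pvRange_map_add_one]
        congr 1
        ring
    have efull : PySem.List.pyRange 0 ((b.length : Int) - 1) 1
        = PySem.List.pyRange 0 i0 1 ++ i0 :: PySem.List.pyRange (i0 + 1) ((b.length : Int) - 1) 1 := by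
      rw [PySem.List.pyRange_one_append 0 i0 ((b.length : Int) - 1) hi0 (by omega)]
      congr 1
      exact PySem.List.pyRange_one_cons hi1
    refine p1.trans ?_
    rw [efull]
    refine List.Perm.trans List.perm_middle ?_
    apply List.Perm.cons
    rw [← emap]
    exact List.Perm.map _ p2.symm
  -- pairwise of the left side
  · apply pvSorted_pairwise_lex (fun i => pvG b i) (fun j => j)
    exact PySem.List.pairwise_lt_pyRange_one 0 ((b.length : Int) - 1)
  -- pairwise of the right side
  · rw [List.pairwise_cons]
    constructor
    · intro z hz
      rcases List.mem_map.mp hz with ⟨j, hj, rfl⟩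
      have hjb := hmemM j hj
      have hzb : 0 ≤ pvPhi i0 j ∧ pvPhi i0 j < (b.length : Int) - 1 ∧ pvPhi i0 j ≠ i0 := by
        unfold pvPhi
        split <;> omega
      exact hfm (pvPhi i0 j) hzb.1 hzb.2.1 hzb.2.2
    · rw [List.pairwise_map]
      have hpw := pvSorted_pairwise_lex (fun i => pvG bM i) (fun j => j)
        (PySem.List.pyRange 0 ((bM.length : Int) - 1) 1)
        (PySem.List.pairwise_lt_pyRange_one 0 ((bM.length : Int) - 1))
      have : (pvOrder bM).Pairwise (pvLexLt (fun i => pvG bM i) (fun j => j)) := hpw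
      refine List.Pairwise.imp_of_mem ?_ this
      intro u v hu hv huv
      have hub := hmemM u hu
      have hvb := hmemM v hv
      unfold pvLexLt at huv ⊢
      simp only at huv ⊢
      rw [← hGM u hub.1 hub.2, ← hGM v hvb.1 hvb.2]
      have hmono : u < v → pvPhi i0 u < pvPhi i0 v := by
        unfold pvPhi
        split <;> split <;> omega
      rcases huv with h1 | ⟨h2, h3⟩
      · exact Or.inl h1
      · exact Or.inr ⟨h2, hmono h3⟩

theorem pvStep (b : List (Int × Int)) (K : Nat) (hK : 1 ≤ K) (h : K < b.length)
    (gm i0 : Int) (rest : List (Int × Int))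
    (hs : PySem.List.sorted (pvGaps b) (fun p => p.1) false = (gm, i0) :: rest) :
    pvBC b K = pvBC ((b.set i0.toNat ((PySem.List.pyGetD b i0 (0, 0)).1,
      (PySem.List.pyGetD b (i0 + 1) (0, 0)).2)).eraseIdx (i0.toNat + 1)) K := by
  have hb : 0 ≤ i0 ∧ i0 < (b.length : Int) - 1 := pvAGapHead_bound b gm i0 rest hs
  obtain ⟨hi0, hi1⟩ := hb
  have hlt : i0.toNat + 1 < b.length := by omega
  -- the merged list, in take/cons/drop form
  have hv : ((PySem.List.pyGetD b i0 (0, 0)).1, (PySem.List.pyGetD b (i0 + 1) (0, 0)).2)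
      = ((b[i0.toNat]'(by omega)).1, (b[i0.toNat + 1]'(by omega)).2) := by
    rw [PySem.List.pyGetD_eq_getElem _ _ hi0 (by omega),
        PySem.List.pyGetD_eq_getElem _ _ (by omega) (by omega)]
    simp only [show (i0 + 1).toNat = i0.toNat + 1 from by omega]
  rw [hv, pvSetErase b i0.toNat _ hlt]
  set bM := b.take i0.toNat ++
      ((b[i0.toNat]'(by omega)).1, (b[i0.toNat + 1]'(by omega)).2) :: b.drop (i0.toNat + 2) with hbM
  have hlenM : bM.length = b.length - 1 := by rw [hbM]; simp; omega
  -- the cut list of b is i0 followed by the reindexed cut list of bM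
  have hcut : pvCut b K = i0 :: (pvCut bM K).map (pvPhi i0) := by
    unfold pvCut
    rw [if_pos h, pvOrder_step b gm i0 rest hs hi0 hi1, ← hbM]
    rw [show b.length - K = (b.length - 1 - K) + 1 from by omega, List.take_succ_cons]
    by_cases h2 : K < bM.length
    · rw [if_pos h2, hlenM, List.map_take]
    · rw [if_neg h2]
      rw [show b.length - 1 - K = 0 from by omega]
      simp
  have hmS : ∀ j ∈ pvCut bM K, 0 ≤ j ∧ j < (b.length : Int) - 2 := by
    intro j hj
    unfold pvCut at hj
    by_cases h2 : K < bM.length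
    · rw [if_pos h2] at hj
      have hj2 := List.mem_of_mem_take hj
      unfold pvOrder at hj2
      rw [PySem.List.mem_sorted] at hj2
      have := PySem.List.mem_pyRange_one.mp hj2
      rw [hlenM] at this
      omega
    · rw [if_neg h2] at hj
      simp at hj
  -- run the merge step through pvRuns
  unfold pvBC
  rw [hcut]
  have hdec : b = b.take i0.toNat ++ (b[i0.toNat]'(by omega)) :: (b[i0.toNat + 1]'(by omega)) :: b.drop (i0.toNat + 2) := by
    conv_lhs => rw [← List.take_append_drop i0.toNat b]
    congr 1
    rw [List.drop_eq_getElem_cons (by omega), List.drop_eq_getElem_cons (by omega)]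
  conv_lhs => rw [hdec]
  rw [pvRuns_merge _ _ _ _ _ _ _ i0
    (by simp; omega)
    (by simp)]
  rw [← hbM]
  apply pvRuns_congr
  intro t ht
  rw [hlenM] at ht
  simp only [zero_add]
  by_cases hc : (t : Int) < i0
  · rw [if_pos hc, decide_eq_decide]
    constructor
    · intro hmem
      rcases List.mem_cons.mp hmem with heq | hmem2
      · omega
      · rcases List.mem_map.mp hmem2 with ⟨u, hu, hphi⟩
        have hub := hmS u hu
        unfold pvPhi at hphi
        by_cases hu2 : u < i0
        · rw [if_pos hu2] at hphi; rw [← hphi]; exact hu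
        · rw [if_neg hu2] at hphi; omega
    · intro hmem
      apply List.mem_cons.mpr
      right
      apply List.mem_map.mpr
      exact ⟨t, hmem, by unfold pvPhi; rw [if_pos hc]⟩
  · rw [if_neg hc, decide_eq_decide]
    constructor
    · intro hmem
      rcases List.mem_cons.mp hmem with heq | hmem2
      · omega
      · rcases List.mem_map.mp hmem2 with ⟨u, hu, hphi⟩
        have hub := hmS u hu
        unfold pvPhi at hphi
        by_cases hu2 : u < i0
        · rw [if_pos hu2] at hphi; omega
        · rw [if_neg hu2] at hphi
          have : u = (t : Int) := by omega
          rw [← this]; exact hu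
    · intro hmem
      apply List.mem_cons.mpr
      right
      apply List.mem_map.mpr
      refine ⟨t, hmem, ?_⟩
      unfold pvPhi
      rw [if_neg hc]

theorem pvALoop_eq_BC (K : Nat) (hK : 1 ≤ K) :
    ∀ (b : List (Int × Int)), pvALoop K b = pvBC b K := by
  suffices H : ∀ (n : Nat) (b : List (Int × Int)), b.length ≤ n → pvALoop K b = pvBC b K by
    exact fun b => H b.length b le_rfl
  intro n
  induction n with
  | zero =>
    intro b hb
    have hbnil : b = [] := List.length_eq_zero_iff.mp (by omega)
    subst hbnil
    rw [pvALoop, dif_neg (by simp)]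
    rfl
  | succ n ih =>
    intro b hb
    by_cases h : K < b.length
    · rw [pvALoop, dif_pos h]
      split
      · next heq =>
        exfalso
        rw [PySem.List.sorted_eq_nil_iff] at heq
        have : (PySem.List.pyRange 0 ((b.length : Int) - 1) 1).length = 0 := by
          rw [List.map_eq_nil_iff.mp heq]
          rfl
        rw [PySem.List.length_pyRange_one] at this
        omega
      · next gm i0 tail heq =>
        have hstep := pvStep b K hK h gm i0 tail heq
        rw [ih _ (by
          have hb2 : 0 ≤ i0 ∧ i0 < (b.length : Int) - 1 := pvAGapHead_bound b gm i0 tail heq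
          have hlt : i0.toNat + 1 < b.length := by omega
          simp [List.length_eraseIdx, List.length_set, hlt]
          omega)]
        exact hstep.symm
    · rw [pvALoop, dif_neg h]
      unfold pvBC
      rw [pvRuns_false]
      intro t ht
      unfold pvCut
      rw [if_neg h]
      simp

theorem merge_bands_to_k_alt_eq_BC (bands : List (Int × Int)) (k : Int) (hk : ¬ k ≤ 0) :
    merge_bands_to_k_alt bands k = pvBC bands k.toNat := by
  unfold merge_bands_to_k_alt
  rw [if_neg hk]
  simp only []
  rw [pvFold_eq_runs, List.nil_append]
  unfold pvBC
  apply pvRuns_congr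
  intro t ht
  simp only [zero_add, decide_eq_decide]
  have horder : PySem.List.sorted (PySem.List.pyRange 0 ((bands.length : Int) - 1) 1)
      (fun i => (PySem.List.pyGetD bands (i + 1) (0, 0)).1 - (PySem.List.pyGetD bands i (0, 0)).2)
      false = pvOrder bands := rfl
  unfold pvCut
  by_cases hc : k < (bands.length : Int)
  · rw [if_pos hc, if_pos (show k.toNat < bands.length from by omega)]
    have hnk : ((bands.length : Int) - k).toNat = bands.length - k.toNat := by omega
    rw [horder, hnk]
    exact PySem.Set.mem_ofList _ _
  · rw [if_neg hc, if_neg (show ¬ k.toNat < bands.length from by omega)]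
    constructor
    · intro hmem
      simpa using (PySem.Set.mem_ofList _ _).mp hmem
    · intro hmem
      simp at hmem

-- ===== VERDICT (by name: the statement is the Claim_ definition above) =====
theorem merge_bands_to_k_spec : Claim_equal_merge_bands_to_k := by
  intro bands k _
  unfold Spec_merge_bands_to_k
  by_cases hk : k ≤ 0
  · unfold merge_bands_to_k merge_bands_to_k_alt
    rw [if_pos hk, if_pos hk]
  · unfold merge_bands_to_k
    rw [if_neg hk]
    have h1 : bands.map (fun x => x) = bands := List.map_id' bands
    rw [h1]
    rw [pvALoop_eq_BC k.toNat (by omega) bands]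
    rw [merge_bands_to_k_alt_eq_BC bands k hk]
    have h2 : (pvBC bands k.toNat).map (fun x => ((x.1 : Int), (x.2 : Int))) = pvBC bands k.toNat :=
      List.map_id' (pvBC bands k.toNat)
    exact h2
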